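-- pv_equiv track=rewrite | github.com/niebzz/advent-of-code | 2023/day 13/day13.py | find_reflections
-- ===== SOURCE A (Python) =====
-- def find_reflections(row: str) -> list:
--     ls = list(row)
--
--     valid_reflections = []
--     for r in range(1, len(ls)):
--         left = ls[r:]
--         right = ls[:r][::-1]
--         left = left[:len(right)]
--         right = right[:len(left)]
--         if left == right:
--             valid_reflections.append(r)
--
--     return valid_reflections
-- ===== SOURCE B (Python) =====
-- def find_reflections(row: str) -> list:
--     # Two-pointer outward walk per boundary with early exit on first mismatch;
--     # no slicing, no list reversal.
--     n = len(row)
--     valid_reflections = []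
--     for r in range(1, n):
--         i, j = r - 1, r
--         while i >= 0 and j < n and row[i] == row[j]:
--             i -= 1
--             j += 1
--         if i < 0 or j == n:
--             valid_reflections.append(r)
--     return valid_reflections
-- ===== Notes on version B (the rewrite author's own statement) =====
-- stated objective: alternative
-- what changed: Per boundary, A builds two slices (suffix and reversed prefix), truncates both and compares whole lists; B instead walks two pointers outward from the boundary character by character and stops at the first mismatch, building no intermediate lists.
import Mathlib
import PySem

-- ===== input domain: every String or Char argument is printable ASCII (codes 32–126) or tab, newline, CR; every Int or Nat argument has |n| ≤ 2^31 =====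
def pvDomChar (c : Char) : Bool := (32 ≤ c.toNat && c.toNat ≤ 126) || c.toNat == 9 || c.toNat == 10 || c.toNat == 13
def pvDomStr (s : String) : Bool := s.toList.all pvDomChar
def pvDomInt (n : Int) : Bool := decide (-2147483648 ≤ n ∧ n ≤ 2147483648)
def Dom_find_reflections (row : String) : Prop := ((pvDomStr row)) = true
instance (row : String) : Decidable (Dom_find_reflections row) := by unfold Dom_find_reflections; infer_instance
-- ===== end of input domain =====

-- B replaces A's per-boundary slice/reverse/compare with a two-pointer outward walk that
-- stops at the first mismatch (alternative decomposition; no slices or reversals built).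

-- ===== PORT A =====
-- helper: xs[::-1]; step -1 is never 0, so slice? is always 'some'
def pyRevSlice (xs : List Char) : List Char :=
  (PySem.List.slice? xs none none (-1)).getD []

def find_reflections (row : String) : List Int :=
  let ls := row.toList
  (PySem.List.pyRange 1 (ls.length : Int) 1).foldl (fun acc r =>
    let left := PySem.List.slice ls (some r) none
    let right := pyRevSlice (PySem.List.slice ls none (some r))
    let left2 := PySem.List.slice left none (some (right.length : Int))
    let right2 := PySem.List.slice right none (some (left2.length : Int))
    if left2 == right2 then acc ++ [r] else acc) []

-- ===== PORT B =====
-- the while-loop of B; Python's i is represented as the Nat i+1 (0 ⟺ python i < 0);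
-- all character indexing in B is in range, ported with List.getD
def mirrorLoop (cs : List Char) (i j : Nat) : Nat × Nat :=
  match i with
  | 0 => (0, j)
  | i' + 1 =>
    if j < cs.length then
      if cs.getD i' ' ' == cs.getD j ' ' then mirrorLoop cs i' (j + 1)
      else (i' + 1, j)
    else (i' + 1, j)

def find_reflections_alt (row : String) : List Int :=
  let cs := row.toList
  let n := cs.length
  (PySem.List.pyRange 1 (n : Int) 1).foldl (fun acc r =>
    let p := mirrorLoop cs r.toNat r.toNat
    if p.1 == 0 || p.2 == n then acc ++ [r] else acc) []

-- ===== PRECONDITION & SPEC =====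
def Spec_find_reflections (row : String) (out : List Int) : Prop := out = find_reflections_alt row
instance (row : String) (out : List Int) : Decidable (Spec_find_reflections row out) := by unfold Spec_find_reflections; infer_instance

-- ===== CLAIM (what is proved, stated in full; the proofs are below) =====
def Claim_equal_find_reflections : Prop := ∀ (row : String), Dom_find_reflections row → Spec_find_reflections row (find_reflections row)

-- ===== LEMMAS AND PROOFS =====

-- characterization of B's while-loop
theorem mirrorLoop_iff (cs : List Char) : ∀ (i j : Nat), j ≤ cs.length →
    (((mirrorLoop cs i j).1 = 0 ∨ (mirrorLoop cs i j).2 = cs.length) ↔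
      ∀ k < min i (cs.length - j), cs.getD (i - 1 - k) ' ' = cs.getD (j + k) ' ') := by
  intro i
  induction i with
  | zero =>
    intro j hj
    simp [mirrorLoop]
  | succ i' ih =>
    intro j hj
    by_cases hjn : j < cs.length
    · by_cases heq : cs.getD i' ' ' = cs.getD j ' '
      · have hrec := ih (j + 1) (by omega)
        rw [mirrorLoop]
        simp only [hjn, if_pos, heq, beq_self_eq_true]
        rw [hrec]
        constructor
        · intro h k hk
          have hk' := Nat.lt_min.mp hk
          rcases Nat.eq_zero_or_pos k with hk0 | hkpos
          · subst hk0; simpa using heq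
          · have := h (k - 1) (Nat.lt_min.mpr ⟨by omega, by omega⟩)
            have e1 : i' - 1 - (k - 1) = i' + 1 - 1 - k := by omega
            have e2 : j + 1 + (k - 1) = j + k := by omega
            rw [e1, e2] at this
            exact this
        · intro h k hk
          have hk' := Nat.lt_min.mp hk
          have := h (k + 1) (Nat.lt_min.mpr ⟨by omega, by omega⟩)
          have e1 : i' + 1 - 1 - (k + 1) = i' - 1 - k := by omega
          have e2 : j + (k + 1) = j + 1 + k := by omega
          rw [e1, e2] at this
          exact this
      · rw [mirrorLoop]
        simp only [hjn, if_pos, beq_iff_eq, heq, if_false]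
        constructor
        · intro h; omega
        · intro h
          exfalso
          have := h 0 (by omega)
          simp at this
          exact heq this
    · have hjeq : j = cs.length := by omega
      rw [mirrorLoop]
      simp only [hjn, if_false]
      constructor
      · intro _ k hk; omega
      · intro _; right; exact hjeq

-- characterization of A's per-boundary slice comparison
theorem sliceCond_iff (ls : List Char) (t : Nat) (ht2 : t < ls.length) :
    ((ls.drop t).take (min t (ls.length - t)) = ((ls.take t).reverse).take (min t (ls.length - t)) ↔
      ∀ k < min t (ls.length - t), ls.getD (t - 1 - k) ' ' = ls.getD (t + k) ' ') := by
  set m := min t (ls.length - t) with hm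
  have hmt : m ≤ t := by omega
  have hmr : m ≤ ls.length - t := by omega
  have hlen1 : ((ls.drop t).take m).length = m := by
    simp [List.length_take, List.length_drop]; omega
  have hlen2 : (((ls.take t).reverse).take m).length = m := by
    simp [List.length_take, List.length_reverse, List.length_take]; omega
  constructor
  · intro h k hk
    have := congrArg (fun l => l[k]?) h
    simp only [List.getElem?_take] at this
    have hk1 : t + k < ls.length := by omega
    have hk2 : t - 1 - k < t := by omega
    rw [if_pos hk, if_pos hk] at this
    rw [List.getElem?_drop] at this
    rw [List.getElem?_reverse (by simp [List.length_take]; omega)] at this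
    simp only [List.length_take] at this
    rw [List.getElem?_take] at this
    have e1 : min t ls.length - 1 - k < t := by omega
    rw [if_pos e1] at this
    have hgd1 : ls.getD (t + k) ' ' = ls[t + k]'(by omega) := by
      simp [List.getD_eq_getElem?_getD, List.getElem?_eq_getElem (by omega : t + k < ls.length)]
    have hgd2 : ls.getD (t - 1 - k) ' ' = ls[t - 1 - k]'(by omega) := by
      simp [List.getD_eq_getElem?_getD, List.getElem?_eq_getElem (by omega : t - 1 - k < ls.length)]
    rw [hgd1, hgd2]
    have e2 : min t ls.length - 1 - k = t - 1 - k := by omega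
    rw [e2] at this
    rw [List.getElem?_eq_getElem (by omega : t + k < ls.length)] at this
    rw [List.getElem?_eq_getElem (by omega : t - 1 - k < ls.length)] at this
    exact (Option.some_injective _ this).symm
  · intro h
    apply List.ext_getElem
    · rw [hlen1, hlen2]
    · intro k hk1 hk2
      rw [hlen1] at hk1
      have hka : t + k < ls.length := by omega
      have hkb : t - 1 - k < ls.length := by omega
      have := h k hk1
      have hgd1 : ls.getD (t + k) ' ' = ls[t + k]'hka := by
        simp [List.getD_eq_getElem?_getD, List.getElem?_eq_getElem hka]
      have hgd2 : ls.getD (t - 1 - k) ' ' = ls[t - 1 - k]'hkb := by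
        simp [List.getD_eq_getElem?_getD, List.getElem?_eq_getElem hkb]
      rw [hgd1, hgd2] at this
      simp only [List.getElem_take, List.getElem_drop, List.getElem_reverse, List.length_take]
      have e2 : min t ls.length - 1 - k = t - 1 - k := by omega
      simp only [e2]
      exact this.symm

-- the two per-boundary conditions coincide for 1 ≤ r < len
theorem cond_eq (ls : List Char) (r : Int) (h1 : 1 ≤ r) (h2 : r < (ls.length : Int)) :
    (let left := PySem.List.slice ls (some r) none
     let right := pyRevSlice (PySem.List.slice ls none (some r))
     let left2 := PySem.List.slice left none (some (right.length : Int))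
     let right2 := PySem.List.slice right none (some (left2.length : Int))
     (left2 == right2)) =
    (let p := mirrorLoop ls r.toNat r.toNat
     (p.1 == 0 || p.2 == ls.length)) := by
  set t := r.toNat with htdef
  have ht1 : 1 ≤ t := by omega
  have ht2 : t < ls.length := by omega
  have hr : r = (t : Int) := by omega
  simp only [hr, pyRevSlice, PySem.List.slice?_none_none_neg_one, Option.getD_some,
    PySem.List.slice_from_natCast, PySem.List.slice_to_natCast]
  -- left = ls.drop t, right = (ls.take t).reverse
  have hrlen : ((ls.take t).reverse).length = t := by simp [List.length_take]; omega
  rw [hrlen]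
  have hl2len : ((ls.drop t).take t).length = min t (ls.length - t) := by
    simp [List.length_take, List.length_drop]
  rw [hl2len]
  have htake : (ls.drop t).take t = (ls.drop t).take (min t (ls.length - t)) := by
    rcases Nat.le_total t (ls.length - t) with hle | hle
    · rw [min_eq_left hle]
    · rw [min_eq_right hle, List.take_of_length_le (by simp; omega), List.take_of_length_le (by simp)]
  rw [htake]
  have hA := sliceCond_iff ls t ht2
  have hB := mirrorLoop_iff ls t t (by omega)
  have hmin : min t (ls.length - t) = min t (ls.length - t) := rfl
  by_cases hc : ∀ k < min t (ls.length - t), ls.getD (t - 1 - k) ' ' = ls.getD (t + k) ' '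
  · have ha : (ls.drop t).take (min t (ls.length - t)) = ((ls.take t).reverse).take (min t (ls.length - t)) := by
      rw [hA]; intro k hk; exact hc k hk
    have hb : (mirrorLoop ls t t).1 = 0 ∨ (mirrorLoop ls t t).2 = ls.length := by
      rw [hB]; intro k hk; exact hc k hk
    rw [ha]
    simp only [beq_self_eq_true]
    rcases hb with hb | hb
    · simp [hb]
    · simp [hb]
  · have ha : ¬ ((ls.drop t).take (min t (ls.length - t)) = ((ls.take t).reverse).take (min t (ls.length - t))) := by
      rw [hA]; exact hc
    have hb : ¬ ((mirrorLoop ls t t).1 = 0 ∨ (mirrorLoop ls t t).2 = ls.length) := by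
      rw [hB]; exact hc
    push Not at hb
    have : ((ls.drop t).take (min t (ls.length - t)) == ((ls.take t).reverse).take (min t (ls.length - t))) = false := by
      simp [ha]
    rw [this]
    simp [hb.1, hb.2]

-- fold both conditions over the same range
theorem foldl_filter_congr (c1 c2 : Int → Bool) :
    ∀ (l : List Int) (acc : List Int), (∀ r ∈ l, c1 r = c2 r) →
    l.foldl (fun a r => if c1 r then a ++ [r] else a) acc =
    l.foldl (fun a r => if c2 r then a ++ [r] else a) acc := by
  intro l
  induction l with
  | nil => intro acc _; rfl
  | cons x xs ih =>
    intro acc h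
    simp only [List.foldl_cons]
    rw [h x (List.mem_cons_self)]
    exact ih _ (fun r hr => h r (List.mem_cons_of_mem _ hr))

-- ===== VERDICT (by name: the statement is the Claim_ definition above) =====
theorem find_reflections_spec : Claim_equal_find_reflections := by
  intro row _
  unfold Spec_find_reflections find_reflections find_reflections_alt
  simp only []
  apply foldl_filter_congr
  intro r hr
  rw [PySem.List.mem_pyRange_one] at hr
  exact cond_eq row.toList r hr.1 hr.2
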